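-- pv_equiv track=rewrite | github.com/kmehran1106/Leetcode | Python/03. Sliding Window/09. Maximum Sum of Continuous Subarray/maximum_sum_of_continous_subarray_index.py | execute_with_index
-- ===== SOURCE A (Python) =====
-- from typing import List
--
-- def execute_with_index(numbers: List[int]) -> List[int]:
--     _max = numbers[0]
--     _sum = 0
--
--     start, end, i = 0, 0, 0
--
--     for index, number in enumerate(numbers):
--         _sum += number
--
--         if _sum > _max:
--             _max = _sum
--             end = index
--             start = i
--
--         if _sum < 0:
--             _sum = 0
--             i = index + 1
--
--     return [start, end]
-- ===== SOURCE B (Python) =====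
-- from typing import List
--
-- def execute_with_index(numbers: List[int]) -> List[int]:
--     # Pass 1: running prefix sums.
--     prefixes = []
--     t = 0
--     for x in numbers:
--         t += x
--         prefixes.append(t)
--
--     # Pass 2: for each position, the minimum prefix seen strictly before it
--     # (including the empty prefix 0) and the index right after that minimum.
--     mins = []
--     minp, minarg = 0, 0
--     for i, p in enumerate(prefixes):
--         mins.append((minp, minarg))
--         if p < minp:
--             minp, minarg = p, i + 1
--
--     # Pass 3: pick the position maximising prefix minus earlier-minimum prefix.
--     best, start, end = numbers[0], 0, 0
--     for i, (p, (mp, ma)) in enumerate(zip(prefixes, mins)):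
--         if p - mp > best:
--             best, end, start = p - mp, i, ma
--     return [start, end]
-- ===== Notes on version B (the rewrite author's own statement) =====
-- stated objective: alternative
-- what changed: Replaces A's single fused reset-to-zero Kadane loop with three staged passes: build the prefix-sum list, scan it into a list of (minimum earlier prefix, its index), then select the position maximising prefix minus earlier minimum over the zipped lists.
import Mathlib
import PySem

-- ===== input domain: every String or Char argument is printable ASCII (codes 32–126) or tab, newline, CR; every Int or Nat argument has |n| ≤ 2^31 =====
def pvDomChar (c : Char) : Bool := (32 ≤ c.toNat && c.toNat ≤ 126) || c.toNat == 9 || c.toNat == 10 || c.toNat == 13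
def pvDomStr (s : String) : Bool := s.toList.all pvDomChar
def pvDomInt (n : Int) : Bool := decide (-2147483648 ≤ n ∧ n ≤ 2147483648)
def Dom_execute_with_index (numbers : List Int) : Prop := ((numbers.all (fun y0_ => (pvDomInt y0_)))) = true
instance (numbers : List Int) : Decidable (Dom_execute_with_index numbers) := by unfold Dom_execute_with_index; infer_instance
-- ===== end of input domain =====

-- B replaces A's fused reset-to-zero Kadane loop with three staged passes
-- (prefix sums, a (min-prefix, index) scan, then a selection pass); same O(n) cost.

-- ===== PORT A =====
-- loop of A: state (_max, _sum, start, end, i), index idx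
def loopA : List Int → Nat → Int → Int → Int → Int → Int → List Int
  | [], _, _mx, _sum, start, e, _i => [start, e]
  | x :: rest, idx, mx, sum, start, e, i =>
    let sum := sum + x
    let (mx, e, start) := if sum > mx then (sum, (idx : Int), i) else (mx, e, start)
    let (sum, i) := if sum < 0 then ((0 : Int), (idx : Int) + 1) else (sum, i)
    loopA rest (idx + 1) mx sum start e i

def execute_with_index (numbers : List Int) : List Int :=
  match numbers with
  | [] => []        -- numbers[0] raises IndexError in Python; excluded by Pre_
  | n0 :: _ => loopA numbers 0 n0 0 0 0 0

-- ===== PORT B =====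
-- pass 1 of B: the list of running prefix sums (accumulator t)
def prefixesB : List Int → Int → List Int
  | [], _ => []
  | x :: rest, t => (t + x) :: prefixesB rest (t + x)

-- pass 2 of B: for each position the minimum earlier prefix and the index after it
def minsB : List Int → Nat → Int → Int → List (Int × Int)
  | [], _, _, _ => []
  | p :: rest, i, minp, minarg =>
    (minp, minarg) ::
      (if p < minp then minsB rest (i + 1) p ((i : Int) + 1)
       else minsB rest (i + 1) minp minarg)

-- pass 3 of B: select the position maximising prefix minus earlier minimum
def selectB : List (Int × Int × Int) → Nat → Int → Int → Int → List Int
  | [], _, _best, start, e => [start, e]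
  | (p, mp, ma) :: rest, i, best, start, e =>
    if p - mp > best then selectB rest (i + 1) (p - mp) ma (i : Int)
    else selectB rest (i + 1) best start e

def execute_with_index_alt (numbers : List Int) : List Int :=
  match numbers with
  | [] => []        -- numbers[0] raises IndexError in Python; excluded by Pre_
  | n0 :: _ =>
    let ps := prefixesB numbers 0
    selectB (ps.zip (minsB ps 0 0 0)) 0 n0 0 0

-- ===== PRECONDITION & SPEC =====
-- Pre_ excludes only the empty list, on which Python A raises IndexError (numbers[0]).
def Pre_execute_with_index (numbers : List Int) : Prop := numbers ≠ []
instance (numbers : List Int) : Decidable (Pre_execute_with_index numbers) := by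
  unfold Pre_execute_with_index; infer_instance
def pvWitness_execute_with_index : List Int := [1, -2, 3]

def Spec_execute_with_index (numbers : List Int) (out : List Int) : Prop := out = execute_with_index_alt numbers
instance (numbers : List Int) (out : List Int) : Decidable (Spec_execute_with_index numbers out) := by unfold Spec_execute_with_index; infer_instance

-- ===== CLAIM (what is proved, stated in full; the proofs are below) =====
def Claim_equal_execute_with_index : Prop := ∀ (numbers : List Int), Dom_execute_with_index numbers → Pre_execute_with_index numbers → Spec_execute_with_index numbers (execute_with_index numbers)

-- ===== LEMMAS AND PROOFS =====

-- Proof-only fused loop: one pass over the prefix sums keeping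
-- (best, start, end, min_prefix, min_arg); B's passes 2+3 fuse into it.
def fusedLoop : List Int → Nat → Int → Int → Int → Int → Int → List Int
  | [], _, _best, start, e, _minp, _minarg => [start, e]
  | p :: rest, idx, best, start, e, minp, minarg =>
    let gain := p - minp
    let (best, e, start) := if gain > best then (gain, (idx : Int), minarg) else (best, e, start)
    let (minp, minarg) := if p < minp then (p, (idx : Int) + 1) else (minp, minarg)
    fusedLoop rest (idx + 1) best start e minp minarg

-- B's selection over the zipped (prefix, mins) lists equals the fused loop.
theorem select_fuse (l : List Int) : ∀ (idx : Nat) (best start e minp minarg : Int),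
    selectB (l.zip (minsB l idx minp minarg)) idx best start e
      = fusedLoop l idx best start e minp minarg := by
  induction l with
  | nil => intro idx best start e minp minarg; rfl
  | cons p rest ih =>
    intro idx best start e minp minarg
    simp only [minsB, fusedLoop]
    by_cases h2 : p < minp
    · simp only [if_pos h2, List.zip_cons_cons, selectB]
      by_cases h1 : p - minp > best
      · simp only [if_pos h1]; exact ih _ _ _ _ _ _
      · simp only [if_neg h1]; exact ih _ _ _ _ _ _
    · simp only [if_neg h2, List.zip_cons_cons, selectB]
      by_cases h1 : p - minp > best
      · simp only [if_pos h1]; exact ih _ _ _ _ _ _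
      · simp only [if_neg h1]; exact ih _ _ _ _ _ _

-- Invariant linking A's loop with the fused loop over prefix sums: A's running sum
-- equals the current prefix (c) minus the minimum prefix, and A's restart index i
-- equals min_arg.
theorem loop_agree (l : List Int) : ∀ (idx : Nat) (mx start e minp minarg c : Int),
    loopA l idx mx (c - minp) start e minarg = fusedLoop (prefixesB l c) idx mx start e minp minarg := by
  induction l with
  | nil => intro idx mx start e minp minarg c; rfl
  | cons x rest ih =>
    intro idx mx start e minp minarg c
    simp only [loopA, fusedLoop, prefixesB]
    have hgain : c - minp + x = c + x - minp := by ring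
    rw [hgain]
    by_cases h1 : c + x - minp > mx
    · simp only [if_pos h1]
      by_cases h2 : c + x - minp < 0
      · have h2' : c + x < minp := by omega
        simp only [if_pos h2, if_pos h2']
        have : (0 : Int) = c + x - (c + x) := by ring
        rw [this]; exact ih _ _ _ _ _ _ _
      · have h2' : ¬ c + x < minp := by omega
        simp only [if_neg h2, if_neg h2']
        exact ih _ _ _ _ _ _ _
    · simp only [if_neg h1]
      by_cases h2 : c + x - minp < 0
      · have h2' : c + x < minp := by omega
        simp only [if_pos h2, if_pos h2']
        have : (0 : Int) = c + x - (c + x) := by ring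
        rw [this]; exact ih _ _ _ _ _ _ _
      · have h2' : ¬ c + x < minp := by omega
        simp only [if_neg h2, if_neg h2']
        exact ih _ _ _ _ _ _ _

-- ===== VERDICT (by name: the statement is the Claim_ definition above) =====
theorem execute_with_index_spec : Claim_equal_execute_with_index := by
  intro numbers _ hpre
  unfold Spec_execute_with_index execute_with_index execute_with_index_alt
  match numbers with
  | [] => exact absurd rfl hpre
  | n0 :: rest =>
    have h := (select_fuse (prefixesB (n0 :: rest) 0) 0 n0 0 0 0 0).trans
      (loop_agree (n0 :: rest) 0 n0 0 0 0 0 0).symm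
    simpa using h.symm
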